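-- pv_equiv track=rewrite | github.com/marielset/si206-ms | 206W17_HW1.py | name_counts
-- ===== SOURCE A (Python) =====
-- def name_counts(names):
--     diction = {}
--     for n in names:
--         if n not in diction:
--             diction[n] = 1
--         else:
--             diction[n] += 1
--     items = diction.items()
--     middle = sorted(items, key = lambda n: n[0])
--     return sorted(middle, key = lambda n: n[1], reverse = True)
-- ===== SOURCE B (Python) =====
-- def name_counts(names):
--     counts = {}
--     for n in names:
--         counts[n] = counts.get(n, 0) + 1
--     return [(name, c)
--             for c in sorted(set(counts.values()), reverse=True)
--             for name in sorted([n for n, k in counts.items() if k == c])]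
-- ===== Notes on version B (the rewrite author's own statement) =====
-- stated objective: alternative
-- what changed: B groups the counted names by count (iterating the distinct counts in descending order and sorting each group's names ascending) instead of A's two successive stable sorts of the full item list.
import Mathlib
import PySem

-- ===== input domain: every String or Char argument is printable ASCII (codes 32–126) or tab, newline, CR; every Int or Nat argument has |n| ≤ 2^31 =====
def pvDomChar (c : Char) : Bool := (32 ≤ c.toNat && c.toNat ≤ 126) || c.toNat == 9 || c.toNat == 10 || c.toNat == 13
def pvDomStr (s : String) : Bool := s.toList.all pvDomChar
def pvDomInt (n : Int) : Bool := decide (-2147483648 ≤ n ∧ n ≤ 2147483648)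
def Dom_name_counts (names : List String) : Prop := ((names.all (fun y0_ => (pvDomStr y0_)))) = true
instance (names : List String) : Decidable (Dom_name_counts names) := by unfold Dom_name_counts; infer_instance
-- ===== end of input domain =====

-- B groups the counted names by count (distinct counts descending, names ascending inside a
-- group) instead of A's two successive stable sorts of the item list: an alternative
-- decomposition of the same O(n log n) task.

-- ===== PORT A =====
def name_counts (names : List String) : List (String × Int) :=
  let diction : PySem.Dict String Int := names.foldl
    (fun d n => if (d.get? n).isNone then d.insert n 1 else d.modify n 0 (fun v => v + 1))
    PySem.Dict.empty
  let middle := PySem.List.sorted diction.items (fun p => p.1)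
  PySem.List.sorted middle (fun p => p.2) true

-- ===== PORT B =====
def name_counts_alt (names : List String) : List (String × Int) :=
  let counts : PySem.Dict String Int := names.foldl
    (fun d n => d.insert n (d.getD n 0 + 1)) PySem.Dict.empty
  (PySem.List.sorted (PySem.Set.ofList counts.values) (fun c => c) true).flatMap
    (fun c =>
      (PySem.List.sorted ((counts.items.filter (fun p => p.2 == c)).map (fun p => p.1))
          (fun n => n)).map (fun n => (n, c)))

-- ===== PRECONDITION & SPEC =====
def Spec_name_counts (names : List String) (out : List (String × Int)) : Prop := out = name_counts_alt names
instance (names : List String) (out : List (String × Int)) : Decidable (Spec_name_counts names out) := by unfold Spec_name_counts; infer_instance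

-- ===== CLAIM (what is proved, stated in full; the proofs are below) =====
def Claim_equal_name_counts : Prop := ∀ (names : List String), Dom_name_counts names → Spec_name_counts names (name_counts names)

-- ===== LEMMAS AND PROOFS =====

-- the target order: count descending, then name ascending (names are distinct, so it is strict)
def Rlex (a b : String × Int) : Prop := b.2 < a.2 ∨ (a.2 = b.2 ∧ a.1 < b.1)

theorem rlex_antisymm (a b : String × Int) (h1 : Rlex a b) (h2 : Rlex b a) : a = b := by
  unfold Rlex at h1 h2
  rcases h1 with h1 | ⟨e1, h1⟩ <;> rcases h2 with h2 | ⟨e2, h2⟩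
  · exact absurd h2 (lt_asymm h1)
  · omega
  · omega
  · exact absurd h2 (lt_asymm h1)

-- A's counting loop and B's counting loop build the same dict
theorem count_fun_eq :
    (fun (d : PySem.Dict String Int) n =>
        if (d.get? n).isNone then d.insert n 1 else d.modify n 0 (fun v => v + 1)) =
    (fun (d : PySem.Dict String Int) n => d.insert n (d.getD n 0 + 1)) := by
  funext d n
  cases h : d.get? n with
  | none => simp [PySem.Dict.getD, h]
  | some v => simp [PySem.Dict.modify, PySem.Dict.getD, h]

-- stability of the reverse insertion sort by snd over a list strictly increasing in fst
theorem insertBy_rlex (x : String × Int) (acc : List (String × Int))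
    (hp : acc.Pairwise Rlex) (hk : ∀ y ∈ acc, y.1 < x.1) :
    (PySem.List.insertBy (fun a b => decide (b.2 < a.2)) x acc).Pairwise Rlex := by
  induction acc with
  | nil => simp [PySem.List.insertBy]
  | cons y ys ih =>
    rw [List.pairwise_cons] at hp
    by_cases hb : y.2 < x.2
    · have hall : ∀ z ∈ y :: ys, Rlex x z := by
        intro z hz
        rcases List.mem_cons.mp hz with rfl | hz
        · exact Or.inl hb
        · have := hp.1 z hz
          unfold Rlex at this ⊢
          left; omega
      simp only [PySem.List.insertBy, hb]
      simp only [decide_true, if_true]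
      exact List.pairwise_cons.mpr ⟨hall, List.pairwise_cons.mpr hp⟩
    · simp only [PySem.List.insertBy, hb]
      refine List.pairwise_cons.mpr ⟨?_, ih hp.2 (fun z hz => hk z (List.mem_cons_of_mem _ hz))⟩
      intro z hz
      rcases (PySem.List.mem_insertBy _ x z ys).mp hz with rfl | hz
      · unfold Rlex
        rcases lt_or_eq_of_le (not_lt.mp hb) with h | h
        · exact Or.inl h
        · exact Or.inr ⟨h.symm, hk y (List.mem_cons_self)⟩
      · exact hp.1 z hz

theorem foldl_rlex (xs : List (String × Int)) (acc : List (String × Int))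
    (hx : xs.Pairwise (fun a b => a.1 < b.1))
    (hp : acc.Pairwise Rlex)
    (hcross : ∀ y ∈ acc, ∀ z ∈ xs, y.1 < z.1) :
    (xs.foldl (fun acc x => PySem.List.insertBy (fun a b => decide (b.2 < a.2)) x acc) acc).Pairwise Rlex := by
  induction xs generalizing acc with
  | nil => exact hp
  | cons x xs ih =>
    rw [List.pairwise_cons] at hx
    refine ih _ hx.2 (insertBy_rlex x acc hp (fun y hy => hcross y hy x List.mem_cons_self)) ?_
    intro y hy z hz
    rcases (PySem.List.mem_insertBy _ x y acc).mp hy with rfl | hy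
    · exact hx.1 z hz
    · exact hcross y hy z (List.mem_cons_of_mem _ hz)

theorem sorted_rev_rlex (xs : List (String × Int)) (hx : xs.Pairwise (fun a b => a.1 < b.1)) :
    (PySem.List.sorted xs (fun p => p.2) true).Pairwise Rlex := by
  rw [PySem.List.sorted_rev_eq_foldl_insertBy]
  exact foldl_rlex xs [] hx List.Pairwise.nil (by simp)

-- partition of a list by the distinct values of snd
theorem flatMap_filter_perm (vs : List Int) (l : List (String × Int))
    (hn : vs.Nodup) (hc : ∀ p ∈ l, p.2 ∈ vs) :
    (vs.flatMap (fun c => l.filter (fun p => p.2 == c))).Perm l := by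
  induction vs generalizing l with
  | nil =>
    have : l = [] := List.eq_nil_iff_forall_not_mem.mpr (fun p hp => by simpa using hc p hp)
    simp [this]
  | cons c vs ih =>
    rw [List.nodup_cons] at hn
    rw [List.flatMap_cons]
    have hstep : ∀ c' ∈ vs, l.filter (fun p => p.2 == c')
        = (l.filter (fun p => !(p.2 == c))).filter (fun p => p.2 == c') := by
      intro c' hc'
      have hne : c' ≠ c := fun h => hn.1 (h ▸ hc')
      rw [List.filter_filter]
      refine List.filter_congr ?_
      intro a _
      by_cases h : a.2 = c'
      · simp [h, hne]
      · simp [h]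
    have hmap : vs.flatMap (fun c' => l.filter (fun p => p.2 == c'))
        = vs.flatMap (fun c' => (l.filter (fun p => !(p.2 == c))).filter (fun p => p.2 == c')) := by
      simp only [List.flatMap]
      congr 1
      exact List.map_congr_left hstep
    have hih : (vs.flatMap (fun c' => (l.filter (fun p => !(p.2 == c))).filter (fun p => p.2 == c'))).Perm
        (l.filter (fun p => !(p.2 == c))) := by
      refine ih _ hn.2 ?_
      intro p hp
      rw [List.mem_filter] at hp
      have := hc p hp.1
      rcases List.mem_cons.mp this with h | h
      · exact absurd h (by simpa using hp.2)
      · exact h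
    rw [hmap]
    refine (List.Perm.append_left _ hih).trans ?_
    simpa using List.filter_append_perm (fun p => p.2 == c) l

-- ===== VERDICT (by name: the statement is the Claim_ definition above) =====
theorem name_counts_spec : Claim_equal_name_counts := by
  intro names _
  unfold Spec_name_counts name_counts name_counts_alt
  rw [count_fun_eq]
  set counts : PySem.Dict String Int :=
    names.foldl (fun d n => d.insert n (d.getD n 0 + 1)) PySem.Dict.empty with hcounts
  -- distinct keys
  have hkeys : (counts.items.map (fun p => p.1)).Nodup := by
    have := PySem.Dict.nodup_keys_foldl_insert names (fun (d : PySem.Dict String Int) x => d.getD x 0 + 1)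
      PySem.Dict.empty (by simp [PySem.Dict.keys, PySem.Dict.empty])
    simpa [PySem.Dict.keys] using this
  set vals := PySem.List.sorted (PySem.Set.ofList counts.values) (fun c => c) true with hvals
  set middle := PySem.List.sorted counts.items (fun p => p.1) with hmiddle
  -- A's result: a permutation of the items, pairwise Rlex
  have hAperm : (PySem.List.sorted middle (fun p => p.2) true).Perm counts.items :=
    (PySem.List.sorted_perm middle (fun p => p.2) true).trans
      (PySem.List.sorted_perm counts.items (fun p => p.1) false)
  have hmid_nodup : (middle.map (fun p => p.1)).Nodup :=
    (((PySem.List.sorted_perm counts.items (fun p => p.1) false).map _).nodup_iff).mpr hkeys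
  have hmid_lt : middle.Pairwise (fun a b => a.1 < b.1) := by
    have hle := PySem.List.sorted_pairwise counts.items (fun p => p.1)
    have hne : middle.Pairwise (fun a b => a.1 ≠ b.1) := List.pairwise_map.mp hmid_nodup
    exact (hle.and hne).imp (fun h => lt_of_le_of_ne h.1 h.2)
  have hA : (PySem.List.sorted middle (fun p => p.2) true).Pairwise Rlex :=
    sorted_rev_rlex middle hmid_lt
  -- B's result: same permutation, pairwise Rlex
  have hvals_nodup : vals.Nodup :=
    ((PySem.List.sorted_perm _ (fun c => c) true).nodup_iff).mpr
      (PySem.Set.nodup_ofList counts.values)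
  have hvals_gt : vals.Pairwise (fun a b => b < a) := by
    have hge := PySem.List.sorted_pairwise_rev (PySem.Set.ofList counts.values) (fun c => c)
    exact (hge.and hvals_nodup).imp (fun h => lt_of_le_of_ne h.1 (Ne.symm h.2))
  have hblock_perm : ∀ c, ((PySem.List.sorted ((counts.items.filter (fun p => p.2 == c)).map
      (fun p => p.1)) (fun n => n)).map (fun n => (n, c))).Perm
      (counts.items.filter (fun p => p.2 == c)) := by
    intro c
    refine ((PySem.List.sorted_perm _ (fun n => n) false).map _).trans ?_
    rw [List.map_map]
    have : ∀ p ∈ counts.items.filter (fun p => p.2 == c),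
        ((fun n => (n, c)) ∘ fun p => p.1) p = id p := by
      intro p hp
      have := (List.mem_filter.mp hp).2
      simp only [beq_iff_eq] at this
      simp [Function.comp, ← this]
    rw [List.map_congr_left this, List.map_id]
  have hBperm : ((vals.flatMap (fun c =>
      (PySem.List.sorted ((counts.items.filter (fun p => p.2 == c)).map (fun p => p.1))
        (fun n => n)).map (fun n => (n, c))))).Perm counts.items := by
    refine (List.Perm.flatMap_left vals (fun c _ => hblock_perm c)).trans ?_
    refine flatMap_filter_perm vals counts.items hvals_nodup ?_
    intro p hp
    have h1 : p.2 ∈ counts.values := List.mem_map_of_mem hp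
    have h2 : p.2 ∈ PySem.Set.ofList counts.values :=
      (PySem.Set.mem_ofList counts.values p.2).mpr h1
    exact ((PySem.List.sorted_perm _ (fun c => c) true).mem_iff).mpr h2
  have hB : (vals.flatMap (fun c =>
      (PySem.List.sorted ((counts.items.filter (fun p => p.2 == c)).map (fun p => p.1))
        (fun n => n)).map (fun n => (n, c)))).Pairwise Rlex := by
    rw [List.pairwise_flatMap]
    constructor
    · intro c _
      rw [List.pairwise_map]
      have hsub : List.Sublist (counts.items.filter (fun p => p.2 == c)) counts.items :=
        List.filter_sublist
      have hnodup : ((counts.items.filter (fun p => p.2 == c)).map (fun p => p.1)).Nodup :=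
        (hsub.map (fun p => p.1)).nodup hkeys
      have hsnodup := ((PySem.List.sorted_perm ((counts.items.filter (fun p => p.2 == c)).map
        (fun p => p.1)) (fun n => n) false).nodup_iff).mpr hnodup
      have hle := PySem.List.sorted_pairwise ((counts.items.filter (fun p => p.2 == c)).map
        (fun p => p.1)) (fun n => n)
      exact (hle.and hsnodup).imp (fun h => Or.inr ⟨rfl, lt_of_le_of_ne h.1 h.2⟩)
    · refine hvals_gt.imp ?_
      intro c c' hlt x hx y hy
      have hxc : x.2 = c := by
        rcases List.mem_map.mp hx with ⟨n, _, rfl⟩; rfl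
      have hyc : y.2 = c' := by
        rcases List.mem_map.mp hy with ⟨n, _, rfl⟩; rfl
      exact Or.inl (by rw [hxc, hyc]; exact hlt)
  exact List.Perm.eq_of_pairwise (fun a b _ _ => rlex_antisymm a b) hA hB
    (hAperm.trans hBperm.symm)
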